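-- pv_equiv track=rewrite | github.com/rowieg/advent-of-code-23 | days/seven.py | is_four_of_a_kind
-- ===== SOURCE A (Python) =====
-- def is_four_of_a_kind(hand):
--     for card in hand:
--         if card != "J":
--           if hand.count(card) == 4:
--               return True
--           if hand.count(card) == 3 and hand.count("J") == 1:
--               return True
--           if hand.count(card) == 2 and hand.count("J") == 2:
--               return True
--           if hand.count(card) == 1 and hand.count("J") == 3:
--               return True
--     return False
-- ===== SOURCE B (Python) =====
-- def is_four_of_a_kind(hand):
--     # One tally pass over the non-J cards, then one arithmetic predicate.
--     jokers = hand.count("J")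
--     counts = {}
--     for card in hand:
--         if card != "J":
--             counts[card] = counts.get(card, 0) + 1
--     return any(n == 4 or (n < 4 and n + jokers == 4) for n in counts.values())
-- ===== Notes on version B (the rewrite author's own statement) =====
-- stated objective: faster
-- what changed: Replaced A's per-card loop that rescans the hand for each of four count/joker equality branches with one tally pass (joker count + frequency dict of non-J cards) followed by a single arithmetic predicate n == 4 or (n < 4 and n + jokers == 4).
import Mathlib
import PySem

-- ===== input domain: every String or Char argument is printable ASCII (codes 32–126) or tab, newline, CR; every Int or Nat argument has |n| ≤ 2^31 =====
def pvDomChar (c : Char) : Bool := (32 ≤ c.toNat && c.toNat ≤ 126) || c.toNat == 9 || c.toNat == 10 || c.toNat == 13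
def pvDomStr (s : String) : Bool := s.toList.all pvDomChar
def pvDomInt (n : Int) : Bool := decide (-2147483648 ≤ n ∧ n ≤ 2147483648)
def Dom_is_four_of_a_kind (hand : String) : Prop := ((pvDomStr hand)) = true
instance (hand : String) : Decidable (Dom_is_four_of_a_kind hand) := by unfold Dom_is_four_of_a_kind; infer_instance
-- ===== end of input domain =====

-- B replaces A's rescan-per-card loop with four equality branches by one tally pass over the
-- non-J cards plus a single arithmetic predicate (count + jokers == 4); objective: simpler.


-- ===== PORT A =====
-- 'for card in hand' iterates one-character strings; 'hand.count(card)' with a length-1 needle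
-- counts occurrences of that character, ported exactly as List.count on the code points.
def isFourOfAKindLoopA (cs : List Char) : List Char → Bool
  | [] => false
  | card :: rest =>
    if card ≠ 'J' then
      if cs.count card == 4 then true
      else if cs.count card == 3 && cs.count 'J' == 1 then true
      else if cs.count card == 2 && cs.count 'J' == 2 then true
      else if cs.count card == 1 && cs.count 'J' == 3 then true
      else isFourOfAKindLoopA cs rest
    else isFourOfAKindLoopA cs rest

def is_four_of_a_kind (hand : String) : Bool :=
  isFourOfAKindLoopA hand.toList hand.toList

-- ===== PORT B =====
def is_four_of_a_kind_alt (hand : String) : Bool :=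
  let cs := hand.toList
  let jokers : Int := (cs.count 'J' : Int)
  let counts : PySem.Dict Char Int :=
    cs.foldl (fun d card => if card ≠ 'J' then d.insert card (d.getD card 0 + 1) else d)
      PySem.Dict.empty
  counts.values.any (fun n => n == 4 || (decide (n < 4) && n + jokers == 4))

-- ===== PRECONDITION & SPEC =====
def Spec_is_four_of_a_kind (hand : String) (out : Bool) : Prop := out = is_four_of_a_kind_alt hand
instance (hand : String) (out : Bool) : Decidable (Spec_is_four_of_a_kind hand out) := by unfold Spec_is_four_of_a_kind; infer_instance

-- ===== CLAIM (what is proved, stated in full; the proofs are below) =====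
def Claim_equal_is_four_of_a_kind : Prop := ∀ (hand : String), Dom_is_four_of_a_kind hand → Spec_is_four_of_a_kind hand (is_four_of_a_kind hand)

-- ===== LEMMAS AND PROOFS =====

-- A's loop is an 'any' over the hand with the four-branch test.
theorem loopA_eq_any (cs l : List Char) :
    isFourOfAKindLoopA cs l = l.any (fun card =>
      decide (card ≠ 'J') &&
        (cs.count card == 4 ||
         (cs.count card == 3 && cs.count 'J' == 1) ||
         (cs.count card == 2 && cs.count 'J' == 2) ||
         (cs.count card == 1 && cs.count 'J' == 3))) := by
  induction l with
  | nil => rfl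
  | cons card rest ih =>
    by_cases hJ : card = 'J'
    · simp [isFourOfAKindLoopA, hJ, ih]
    · simp only [isFourOfAKindLoopA, hJ, List.any_cons, ite_not, ih]
      split_ifs with h1 h2 h3 h4 <;> simp_all

-- any over the distinct elements = any over the list (the predicate only reads the element).
theorem any_ofList (xs : List Char) (g : Char → Bool) :
    (PySem.Set.ofList xs).any g = xs.any g := by
  rw [Bool.eq_iff_iff, List.any_eq_true, List.any_eq_true]
  constructor
  · rintro ⟨x, hx, h⟩; exact ⟨x, (PySem.Set.mem_ofList xs x).mp hx, h⟩
  · rintro ⟨x, hx, h⟩; exact ⟨x, (PySem.Set.mem_ofList xs x).mpr hx, h⟩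

theorem main_eq (hand : String) : is_four_of_a_kind hand = is_four_of_a_kind_alt hand := by
  unfold is_four_of_a_kind is_four_of_a_kind_alt
  set cs := hand.toList with hcs
  rw [loopA_eq_any]
  simp only
  have hsplit := PySem.List.foldl_ite_eq_foldl_filter (fun card : Char => card ≠ 'J')
    (fun (d : PySem.Dict Char Int) card => d.insert card (d.getD card 0 + 1)) cs PySem.Dict.empty
  rw [hsplit, PySem.Dict.foldl_insert_getD_add_one_eq_counter]
  set fl := cs.filter (fun x => decide (x ≠ 'J')) with hfl
  have hvals : (PySem.Dict.counter fl).values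
      = (PySem.Set.ofList fl).map (fun k => ((fl.count k : Int))) := by
    show ((PySem.Dict.counter fl).items).map (·.2) = _
    rw [PySem.Dict.items_counter]
    simp [List.map_map, Function.comp]
  rw [hvals, List.any_map, any_ofList, List.any_filter]
  rw [Bool.eq_iff_iff, List.any_eq_true, List.any_eq_true]
  constructor
  · rintro ⟨c, hc, h⟩
    refine ⟨c, hc, ?_⟩
    have hcnt : c ∈ fl → fl.count c = cs.count c := fun _ =>
      List.count_filter (by simp_all)
    by_cases hJ : c = 'J'
    · simp [hJ] at h
    · have hmem : c ∈ fl := by rw [hfl, List.mem_filter]; simp [hc, hJ]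
      have := hcnt hmem
      simp only [Function.comp, decide_eq_true_eq, Bool.and_eq_true, Bool.or_eq_true,
        beq_iff_eq, decide_eq_true_eq] at h ⊢
      rw [this]
      have h2 := h.2
      exact ⟨hJ, by omega⟩
  · rintro ⟨c, hc, h⟩
    refine ⟨c, hc, ?_⟩
    simp only [Function.comp, decide_eq_true_eq, Bool.and_eq_true, Bool.or_eq_true,
      beq_iff_eq, decide_eq_true_eq] at h ⊢
    obtain ⟨hJ, hp⟩ := h
    have hcnt : fl.count c = cs.count c := List.count_filter (by simp [hJ])
    rw [hcnt] at hp
    have hpos : 0 < cs.count c := List.count_pos_iff.mpr hc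
    exact ⟨hJ, by omega⟩

-- ===== VERDICT (by name: the statement is the Claim_ definition above) =====
theorem is_four_of_a_kind_spec : Claim_equal_is_four_of_a_kind := by
  intro hand _
  exact main_eq hand
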